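/- GENERATED by farm/mkstatement.py from design/units.tsv (unit `start_decoder.C16`) and the assertions of Vorbis/Spec/StartDecoderA.lean — do not edit.
   THE STATEMENT of the proof unit `start_decoder.C16`: segment C16 of `start_decoder` (20 instructions; entries 0x1151bf;
   exits 0x113b22,0x11520c; ranges 0x1151bf-0x115207)
   takes each of its entry assertions to one of its exit assertions (`Vorbis.Spec.StartDecoder.SegC16`), given the contracts of its callees.
   What the names mean: Vorbis/Spec/Basic.lean (the shared hypotheses), Vorbis/Spec/StartDecoderA.lean (the assertions). The theorem to prove:
   `theorem start_decoder_C16_ok : Vorbis.Spec.start_decoder_C16.Statement`. -/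
import Vorbis.Spec.Leaves
import Vorbis.Spec.Reader
import Vorbis.Spec.StartDecoderA
namespace Vorbis.Spec.start_decoder_C16
open X86 X86.User Asan

/-- The statement of unit `start_decoder.C16`. -/
def Statement : Prop :=
  ∀ (Lay : Layout) (_hLay : Lay.hi = 0x1000000) (μ : Microarch) (_hμ : UserX.MicroOK μ) (u₀ : State)
    (_hcode : HasCodeNat Lay u₀ Vorbis.L.start_decoder.entry Vorbis.Code.code_start_decoder.nat Vorbis.L.start_decoder.size)
    (_h_get_bits : ∀ (others : List Obj) (frames : List (Nat × FrameLayout)) (Blk : Block → Prop) (len : Nat), Calls Lay μ Vorbis.WayInv (Vorbis.conv u₀) Vorbis.L.get_bits.entry (Vorbis.Spec.get_bits.spec others frames Blk len))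
    (_h_error : ∀ (others : List Obj) (frames : List (Nat × FrameLayout)), Calls Lay μ Vorbis.WayInv (Vorbis.conv u₀) Vorbis.L.error.entry (Vorbis.Spec.error.spec others frames)),
    Vorbis.Spec.StartDecoder.SegC16 Lay μ u₀

end Vorbis.Spec.start_decoder_C16
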